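-- pv_equiv track=rewrite | github.com/ahyangyi/agrf | agrf/lib/building/symmetry.py | __merge_descriptor
-- ===== SOURCE A (Python) =====
-- def __merge_descriptor(descriptor, merge_operations):
--     assignment = {}
--     for a, b in merge_operations:
--         while a in assignment:
--             a = assignment[a]
--         while b in assignment:
--             b = assignment[b]
--         if a == b:
--             continue
--         if a < b:
--             assignment[b] = a
--         else:
--             assignment[a] = b
--
--     ret = []
--     for x in descriptor:
--         while x in assignment:
--             x = assignment[x]
--         ret.append(x)
--     return tuple(ret)
-- ===== SOURCE B (Python) =====
-- def __merge_descriptor(descriptor, merge_operations):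
--     # Eager "flattened" representative map: rep maps every touched element
--     # directly to the minimum of its merged class; no chain chasing anywhere.
--     rep = {}
--     for a, b in merge_operations:
--         ra = rep.get(a, a)
--         rb = rep.get(b, b)
--         if ra == rb:
--             continue
--         lo, hi = (ra, rb) if ra < rb else (rb, ra)
--         for k, v in rep.items():
--             if v == hi:
--                 rep[k] = lo
--         rep[hi] = lo
--     return tuple(rep.get(x, x) for x in descriptor)
-- ===== Notes on version B (the rewrite author's own statement) =====
-- stated objective: alternative
-- what changed: A keeps a lazy parent-pointer forest and resolves every element by chasing assignment chains with while loops; B keeps an eagerly flattened map (element -> class minimum), relabelling stored representatives at each union, so lookups are single dict reads and no chasing loop exists.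
import Mathlib
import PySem

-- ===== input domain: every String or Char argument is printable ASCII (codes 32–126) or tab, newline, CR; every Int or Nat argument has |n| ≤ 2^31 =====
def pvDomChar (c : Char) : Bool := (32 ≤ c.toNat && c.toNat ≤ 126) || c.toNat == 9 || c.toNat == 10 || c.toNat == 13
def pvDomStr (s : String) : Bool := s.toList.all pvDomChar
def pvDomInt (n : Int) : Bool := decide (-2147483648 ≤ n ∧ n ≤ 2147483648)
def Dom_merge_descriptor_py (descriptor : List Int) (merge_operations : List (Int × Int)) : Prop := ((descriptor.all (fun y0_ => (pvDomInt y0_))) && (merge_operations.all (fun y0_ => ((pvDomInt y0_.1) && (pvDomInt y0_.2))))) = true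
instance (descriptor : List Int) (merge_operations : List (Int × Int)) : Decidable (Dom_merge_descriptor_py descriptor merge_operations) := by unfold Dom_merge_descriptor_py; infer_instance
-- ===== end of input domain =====

-- B replaces A's lazy parent-pointer chains (resolved by while-loop chasing) with an eagerly
-- flattened element→class-minimum map updated at each union; same return value, no speed claim.

-- ===== PORT A =====
-- 'while x in assignment: x = assignment[x]' — fuel (d.size + 1) is a totality guard only:
-- every value stored is strictly smaller than its key, so a chain visits distinct keys and
-- reaches a non-key within d.size steps (proved in pvChase_fix below).
def pvChase (d : PySem.Dict Int Int) (x : Int) : Nat → Int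
  | 0 => x
  | n + 1 =>
    match d.get? x with
    | none => x
    | some v => pvChase d v n

def pvStepA (d : PySem.Dict Int Int) (op : Int × Int) : PySem.Dict Int Int :=
  let a := pvChase d op.1 (d.size + 1)
  let b := pvChase d op.2 (d.size + 1)
  if a = b then d
  else if a < b then d.insert b a
  else d.insert a b

def merge_descriptor_py (descriptor : List Int) (merge_operations : List (Int × Int)) : List Int :=
  let assignment := merge_operations.foldl pvStepA PySem.Dict.empty
  descriptor.map (fun x => pvChase assignment x (assignment.size + 1))

-- ===== PORT B =====
def pvStepB (r : PySem.Dict Int Int) (op : Int × Int) : PySem.Dict Int Int :=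
  let ra := r.getD op.1 op.1
  let rb := r.getD op.2 op.2
  if ra = rb then r
  else
    let lo := if ra < rb then ra else rb
    let hi := if ra < rb then rb else ra
    (r.items.foldl (fun acc kv => if kv.2 = hi then acc.insert kv.1 lo else acc) r).insert hi lo

def merge_descriptor_py_alt (descriptor : List Int) (merge_operations : List (Int × Int)) : List Int :=
  let rep := merge_operations.foldl pvStepB PySem.Dict.empty
  descriptor.map (fun x => rep.getD x x)

-- ===== PRECONDITION & SPEC =====
def Spec_merge_descriptor_py (descriptor : List Int) (merge_operations : List (Int × Int)) (out : List Int) : Prop := out = merge_descriptor_py_alt descriptor merge_operations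
instance (descriptor : List Int) (merge_operations : List (Int × Int)) (out : List Int) : Decidable (Spec_merge_descriptor_py descriptor merge_operations out) := by unfold Spec_merge_descriptor_py; infer_instance

-- ===== CLAIM (what is proved, stated in full; the proofs are below) =====
def Claim_equal_merge_descriptor_py : Prop := ∀ (descriptor : List Int) (merge_operations : List (Int × Int)), Dom_merge_descriptor_py descriptor merge_operations → Spec_merge_descriptor_py descriptor merge_operations (merge_descriptor_py descriptor merge_operations)

-- ===== LEMMAS AND PROOFS =====
theorem pvChase_nonkey (d : PySem.Dict Int Int) (x : Int) (h : d.get? x = none) :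
    ∀ n, pvChase d x n = x := by
  intro n; cases n with
  | zero => rfl
  | succ n => simp [pvChase, h]

theorem pvCountP_mono (l : List Int) (v x : Int) (hvx : v ≤ x) :
    l.countP (fun k => decide (k ≤ v)) ≤ l.countP (fun k => decide (k ≤ x)) := by
  apply List.countP_mono_left
  intro a _ h
  simp at h ⊢; omega

theorem pvCountP_lt (l : List Int) (v x : Int) (hvx : v < x) (hx : x ∈ l) :
    l.countP (fun k => decide (k ≤ v)) < l.countP (fun k => decide (k ≤ x)) := by
  induction l with
  | nil => simp at hx
  | cons y t ih =>
    rw [List.countP_cons, List.countP_cons]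
    rcases List.mem_cons.mp hx with rfl | hxt
    · have h1 : (decide (x ≤ v) : Bool) = false := by simp; omega
      have h2 : (decide (x ≤ x) : Bool) = true := by simp
      have := pvCountP_mono t v x (by omega)
      simp [h1]; omega
    · have := ih hxt
      by_cases hc : y ≤ v
      · have hcx : y ≤ x := by omega
        simp [hc, hcx]; omega
      · simp [hc]; omega

def pvDec (d : PySem.Dict Int Int) : Prop := ∀ k v : Int, d.get? k = some v → v < k

theorem pvChase_fix (d : PySem.Dict Int Int) (hd : pvDec d) :
    ∀ (n : Nat) (x : Int), d.keys.countP (fun k => decide (k ≤ x)) < n →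
      d.get? (pvChase d x n) = none := by
  intro n
  induction n with
  | zero => intro x h; omega
  | succ n ih =>
    intro x h
    cases hg : d.get? x with
    | none => simp [pvChase, hg]
    | some v =>
      have hvx : v < x := hd x v hg
      have hxk : x ∈ d.keys := by
        by_contra hc
        rw [(PySem.Dict.get?_eq_none_iff_not_mem_keys d x).mpr hc] at hg
        simp at hg
      have := pvCountP_lt d.keys v x hvx hxk
      have hlt : d.keys.countP (fun k => decide (k ≤ v)) < n := by omega
      simpa [pvChase, hg] using ih v hlt

theorem pvChase_root (d : PySem.Dict Int Int) (hd : pvDec d) (x : Int) :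
    d.get? (pvChase d x (d.size + 1)) = none := by
  apply pvChase_fix d hd
  have h1 : d.keys.countP (fun k => decide (k ≤ x)) ≤ d.keys.length := List.countP_le_length
  have h2 : d.keys.length = d.size := by
    simp [PySem.Dict.keys, PySem.Dict.size]
  omega

theorem pvChase_insert (d : PySem.Dict Int Int) (_hd : pvDec d) (hi lo : Int)
    (hhi : d.get? hi = none) (hlo : d.get? lo = none) (hne : hi ≠ lo) :
    ∀ (n : Nat) (x : Int), d.get? (pvChase d x n) = none →
      pvChase (d.insert hi lo) x (n + 1) =
        if pvChase d x n = hi then lo else pvChase d x n := by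
  have hlo' : (d.insert hi lo).get? lo = none := by
    rw [PySem.Dict.get?_insert]
    simp [Ne.symm hne, hlo]
  intro n
  induction n with
  | zero =>
    intro x hx
    have hx0 : d.get? x = none := hx
    by_cases hxhi : x = hi
    · simp [pvChase, hxhi]
    · simp [pvChase, PySem.Dict.get?_insert, hxhi, hx0]
  | succ n ih =>
    intro x hx
    cases hg : d.get? x with
    | none =>
      have hch : pvChase d x (n + 1) = x := pvChase_nonkey d x hg _
      rw [hch]
      by_cases hxhi : x = hi
      · simp [pvChase, PySem.Dict.get?_insert, hxhi, Ne.symm hne, hlo]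
      · simp [pvChase, PySem.Dict.get?_insert, hxhi, hg]
    | some v =>
      have hxhi : x ≠ hi := by rintro rfl; rw [hhi] at hg; simp at hg
      have hstep : pvChase d x (n + 1) = pvChase d v n := by simp [pvChase, hg]
      rw [hstep] at hx ⊢
      have hih := ih v hx
      calc pvChase (d.insert hi lo) x (n + 1 + 1)
          = pvChase (d.insert hi lo) v (n + 1) := by
            simp [pvChase, PySem.Dict.get?_insert, hxhi, hg]
        _ = _ := hih

theorem pvFoldB_get?_nmem (hi lo : Int) (l : List (Int × Int)) :
    ∀ (acc : PySem.Dict Int Int) (k : Int), k ∉ l.map Prod.fst →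
      (l.foldl (fun acc kv => if kv.2 = hi then acc.insert kv.1 lo else acc) acc).get? k
        = acc.get? k := by
  induction l with
  | nil => intro acc k _; rfl
  | cons p t ih =>
    intro acc k hk
    simp only [List.map_cons, List.mem_cons, not_or] at hk
    rw [List.foldl_cons, ih _ k hk.2]
    by_cases hp : p.2 = hi
    · simp [hp, PySem.Dict.get?_insert, hk.1]
    · simp [hp]

theorem pvFoldB_get?_mem (hi lo : Int) (l : List (Int × Int)) :
    ∀ (acc : PySem.Dict Int Int) (k v : Int), (l.map Prod.fst).Nodup → (k, v) ∈ l →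
      (l.foldl (fun acc kv => if kv.2 = hi then acc.insert kv.1 lo else acc) acc).get? k
        = if v = hi then some lo else acc.get? k := by
  induction l with
  | nil => intro acc k v _ hm; simp at hm
  | cons p t ih =>
    intro acc k v hnd hm
    simp only [List.map_cons, List.nodup_cons] at hnd
    rcases List.mem_cons.mp hm with rfl | hmt
    · have hk : k ∉ t.map Prod.fst := hnd.1
      rw [List.foldl_cons, pvFoldB_get?_nmem hi lo t _ k hk]
      by_cases hv : v = hi
      · simp [hv, PySem.Dict.get?_insert_self]
      · simp [hv]
    · have hpk : p.1 ≠ k := by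
        intro he
        apply hnd.1
        rw [he]
        exact List.mem_map.mpr ⟨(k, v), hmt, rfl⟩
      rw [List.foldl_cons]
      rw [ih _ k v hnd.2 hmt]
      by_cases hp : p.2 = hi
      · simp [hp, PySem.Dict.get?_insert_of_ne _ _ (Ne.symm hpk)]
      · simp [hp]

theorem pvFoldB_get?_eq (r : PySem.Dict Int Int) (hnd : r.keys.Nodup) (hi lo k : Int) :
    (r.items.foldl (fun acc kv => if kv.2 = hi then acc.insert kv.1 lo else acc) r).get? k
      = (r.get? k).map (fun w => if w = hi then lo else w) := by
  have hkeys : r.keys = r.items.map Prod.fst := rfl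
  cases hg : r.get? k with
  | none =>
    have hk : k ∉ r.items.map Prod.fst := by
      rw [← hkeys]; exact (PySem.Dict.get?_eq_none_iff_not_mem_keys r k).mp hg
    simp [pvFoldB_get?_nmem hi lo r.items r k hk, hg]
  | some v =>
    have hm : (k, v) ∈ r.items := PySem.Dict.mem_items_of_get?_eq_some r hg
    rw [pvFoldB_get?_mem hi lo r.items r k v (hkeys ▸ hnd) hm]
    by_cases hv : v = hi
    · simp [hv]
    · simp [hv, hg]

theorem pvFoldB_nodup (hi lo : Int) (l : List (Int × Int)) :
    ∀ (acc : PySem.Dict Int Int), acc.keys.Nodup →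
      (l.foldl (fun acc kv => if kv.2 = hi then acc.insert kv.1 lo else acc) acc).keys.Nodup := by
  induction l with
  | nil => intro acc h; exact h
  | cons p t ih =>
    intro acc h
    rw [List.foldl_cons]
    apply ih
    by_cases hp : p.2 = hi
    · rw [if_pos hp]
      exact PySem.Dict.nodup_keys_insert _ _ _ h
    · rw [if_neg hp]
      exact h

def pvInv (d r : PySem.Dict Int Int) : Prop :=
  pvDec d ∧ pvDec r ∧ r.keys.Nodup ∧
  ∀ x : Int, pvChase d x (d.size + 1) = r.getD x x

theorem pvInsert_inv (d r : PySem.Dict Int Int) (h : pvInv d r) (hi lo : Int)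
    (hhi : d.get? hi = none) (hlo : d.get? lo = none) (hlohi : lo < hi) :
    pvInv (d.insert hi lo)
      ((r.items.foldl (fun acc kv => if kv.2 = hi then acc.insert kv.1 lo else acc) r).insert hi lo) := by
  obtain ⟨hd, hr, hnd, hcorr⟩ := h
  have hne : hi ≠ lo := by omega
  have hfold := pvFoldB_get?_eq r hnd hi lo
  refine ⟨?_, ?_, ?_, ?_⟩
  · -- pvDec of A's new dict
    intro k v hkv
    rw [PySem.Dict.get?_insert] at hkv
    by_cases hk : k = hi
    · rw [if_pos hk] at hkv
      cases hkv; omega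
    · rw [if_neg hk] at hkv; exact hd k v hkv
  · -- pvDec of B's new dict
    intro k v hkv
    rw [PySem.Dict.get?_insert] at hkv
    by_cases hk : k = hi
    · rw [if_pos hk] at hkv
      cases hkv; omega
    · rw [if_neg hk, hfold k] at hkv
      cases hg : r.get? k with
      | none => rw [hg] at hkv; simp at hkv
      | some w =>
        rw [hg] at hkv
        simp only [Option.map_some, Option.some.injEq] at hkv
        have hwk : w < k := hr k w hg
        by_cases hw : w = hi
        · rw [if_pos hw] at hkv; omega
        · rw [if_neg hw] at hkv; omega
  · -- nodup keys
    exact PySem.Dict.nodup_keys_insert _ _ _ (pvFoldB_nodup hi lo r.items r hnd)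
  · -- correspondence
    intro x
    have hsize : (d.insert hi lo).size = d.size + 1 := by
      rw [PySem.Dict.size_insert]
      have : d.contains hi = false := by
        rw [PySem.Dict.contains_eq_isSome_get?, hhi]; rfl
      rw [this]; simp
    have hins := pvChase_insert d hd hi lo hhi hlo hne (d.size + 1) x (pvChase_root d hd x)
    rw [hsize, hins, hcorr x]
    rw [PySem.Dict.getD_insert]
    have hfoldD : (r.items.foldl (fun acc kv => if kv.2 = hi then acc.insert kv.1 lo else acc) r).getD x x
        = ((r.get? x).map (fun w => if w = hi then lo else w)).getD x := by
      rw [PySem.Dict.getD_eq_get?_getD, hfold x]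
    rw [hfoldD]
    have hrhi : r.getD hi hi = hi := by
      rw [← hcorr hi, pvChase_nonkey d hi hhi]
    cases hg : r.get? x with
    | none =>
      have hrx : r.getD x x = x := by rw [PySem.Dict.getD_eq_get?_getD, hg]; rfl
      rw [hrx]
      simp
    | some w =>
      have hrx : r.getD x x = w := by rw [PySem.Dict.getD_eq_get?_getD, hg]; rfl
      have hxhi : x ≠ hi := by
        intro he
        have : w < x := hr x w hg
        rw [he] at hrx
        rw [hrx] at hrhi
        omega
      rw [hrx]
      simp [hxhi]

theorem pvStep_inv (d r : PySem.Dict Int Int) (op : Int × Int) (h : pvInv d r) :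
    pvInv (pvStepA d op) (pvStepB r op) := by
  obtain ⟨hd, hr, hnd, hcorr⟩ := h
  have h1 : pvChase d op.1 (d.size + 1) = r.getD op.1 op.1 := hcorr op.1
  have h2 : pvChase d op.2 (d.size + 1) = r.getD op.2 op.2 := hcorr op.2
  have hra : d.get? (r.getD op.1 op.1) = none := h1 ▸ pvChase_root d hd op.1
  have hrb : d.get? (r.getD op.2 op.2) = none := h2 ▸ pvChase_root d hd op.2
  simp only [pvStepA, pvStepB, h1, h2]
  by_cases heq : r.getD op.1 op.1 = r.getD op.2 op.2
  · simp only [heq, ite_self]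
    exact ⟨hd, hr, hnd, hcorr⟩
  · rw [if_neg heq, if_neg heq]
    by_cases hlt : r.getD op.1 op.1 < r.getD op.2 op.2
    · rw [if_pos hlt]
      simp only [if_pos hlt]
      exact pvInsert_inv d r ⟨hd, hr, hnd, hcorr⟩ _ _ hrb hra hlt
    · rw [if_neg hlt]
      simp only [if_neg hlt]
      have : r.getD op.2 op.2 < r.getD op.1 op.1 := by
        rcases lt_or_ge (r.getD op.2 op.2) (r.getD op.1 op.1) with h | h
        · exact h
        · exact absurd (le_antisymm (not_lt.mp hlt) h) (fun he => heq he.symm)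
      exact pvInsert_inv d r ⟨hd, hr, hnd, hcorr⟩ _ _ hra hrb this

theorem pvFold_inv (ops : List (Int × Int)) :
    ∀ (d r : PySem.Dict Int Int), pvInv d r →
      pvInv (ops.foldl pvStepA d) (ops.foldl pvStepB r) := by
  intro d r h
  induction ops generalizing d r with
  | nil => exact h
  | cons op ops ih => exact ih _ _ (pvStep_inv d r op h)

-- ===== VERDICT (by name: the statement is the Claim_ definition above) =====
theorem merge_descriptor_py_spec : Claim_equal_merge_descriptor_py := by
  intro descriptor merge_operations _
  unfold Spec_merge_descriptor_py merge_descriptor_py merge_descriptor_py_alt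
  have hbase : pvInv PySem.Dict.empty PySem.Dict.empty := by
    refine ⟨?_, ?_, ?_, ?_⟩
    · intro k v h; simp [PySem.Dict.get?_empty] at h
    · intro k v h; simp [PySem.Dict.get?_empty] at h
    · simp [PySem.Dict.keys_empty]
    · intro x
      rw [pvChase_nonkey _ _ (PySem.Dict.get?_empty x)]
      simp [PySem.Dict.getD_empty]
  have h := pvFold_inv merge_operations _ _ hbase
  exact List.map_congr_left (fun x _ => h.2.2.2 x)
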